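-- pv_equiv track=rewrite | github.com/autodiffdreamteam/cs107-FinalProject | docs/Newtons_Method.py | string_convert
-- ===== SOURCE A (Python) =====
-- def string_convert(string): # if fun is a var name, add as parameter
--     string = string
--     func_dict = ['exp(', 'cos(', 'sin(', 'tan('] # etc
--     expression = ''
--     for i in range(len(string)):
--         try:
--             if string[i:i+4] in func_dict:
--                 expression +='fun.'
--         except IndexError:
--             pass
--
--         if string[i] == '^':
--             expression += '**'
--         else:
--             expression += string[i]
--     return expression
-- ===== SOURCE B (Python) =====
-- def string_convert(string):
--     pieces = []
--     i = 0
--     n = len(string)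
--     while i < n:
--         for head in ('exp(', 'cos(', 'sin(', 'tan('):
--             if string.startswith(head, i):
--                 pieces.append('fun.' + head)
--                 i += 4
--                 break
--         else:
--             c = string[i]
--             pieces.append('**' if c == '^' else c)
--             i += 1
--     return ''.join(pieces)
-- ===== Notes on version B (the rewrite author's own statement) =====
-- stated objective: alternative
-- what changed: A tests a 4-character slice against the head list at every index and appends character by character; B is a single forward scanner that recognises a function head via startswith, emits the whole prefixed head and skips its four characters at once, collecting chunks that are joined at the end.
import Mathlib
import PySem

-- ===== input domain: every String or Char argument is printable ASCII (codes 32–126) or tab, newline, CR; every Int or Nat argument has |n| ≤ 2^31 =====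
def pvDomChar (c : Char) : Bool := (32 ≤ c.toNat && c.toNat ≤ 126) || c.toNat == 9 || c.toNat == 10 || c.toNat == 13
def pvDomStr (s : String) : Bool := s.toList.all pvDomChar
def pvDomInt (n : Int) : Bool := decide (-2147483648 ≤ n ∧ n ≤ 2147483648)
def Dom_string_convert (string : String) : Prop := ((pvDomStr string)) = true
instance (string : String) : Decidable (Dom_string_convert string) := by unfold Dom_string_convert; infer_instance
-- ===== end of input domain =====

-- B replaces A's per-index slice-membership loop with a single forward scanner that recognises a
-- function head wholesale (emitting the prefixed chunk and consuming all four characters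
-- at once) and joins the chunks at the end; objective: alternative decomposition, same cost.

-- ===== PORT A =====
def string_convert (string : String) : String :=
  let s := string.toList
  let func_dict : List (List Char) :=
    [['e','x','p','('], ['c','o','s','('], ['s','i','n','('], ['t','a','n','(']]
  let expression :=
    (PySem.List.pyRange 0 s.length 1).foldl (fun expr i =>
      let expr := if PySem.List.slice s (some i) (some (i + 4)) ∈ func_dict
                  then expr ++ ['f','u','n','.'] else expr
      -- string[i]: i always in range here, Python never raises; pyGetD is exact on this loop
      let c := PySem.List.pyGetD s i ' '
      if c = '^' then expr ++ ['*','*'] else expr ++ [c]) []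
  String.ofList expression

-- ===== PORT B =====
-- the while/startswith scanner of Source B: each head is one pattern, consumed wholesale as a chunk
def pvScan : List Char → List (List Char)
  | 'e' :: 'x' :: 'p' :: '(' :: rest => ['f','u','n','.','e','x','p','('] :: pvScan rest
  | 'c' :: 'o' :: 's' :: '(' :: rest => ['f','u','n','.','c','o','s','('] :: pvScan rest
  | 's' :: 'i' :: 'n' :: '(' :: rest => ['f','u','n','.','s','i','n','('] :: pvScan rest
  | 't' :: 'a' :: 'n' :: '(' :: rest => ['f','u','n','.','t','a','n','('] :: pvScan rest
  | c :: rest => (if c = '^' then ['*','*'] else [c]) :: pvScan rest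
  | [] => []

def string_convert_alt (string : String) : String :=
  String.ofList (PySem.Chars.join [] (pvScan string.toList))

-- ===== PRECONDITION & SPEC =====
def Spec_string_convert (string : String) (out : String) : Prop := out = string_convert_alt string
instance (string : String) (out : String) : Decidable (Spec_string_convert string out) := by unfold Spec_string_convert; infer_instance

-- ===== CLAIM (what is proved, stated in full; the proofs are below) =====
def Claim_equal_string_convert : Prop := ∀ (string : String), Dom_string_convert string → Spec_string_convert string (string_convert string)

-- ===== LEMMAS AND PROOFS =====

-- recursive characterisation of what A's index loop appends for each suffix of the input
def pvARec : List Char → List Char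
  | [] => []
  | c :: cs =>
      (if (c :: cs).take 4 ∈ [['e','x','p','('], ['c','o','s','('], ['s','i','n','('], ['t','a','n','(']]
       then ['f','u','n','.'] else [])
      ++ (if c = '^' then ['*','*'] else [c]) ++ pvARec cs

-- A's loop from position u.length on w = u ++ s appends exactly pvARec s
theorem pvLoop (s : List Char) : ∀ (w u acc : List Char), w = u ++ s →
    (PySem.List.pyRange (u.length) (w.length) 1).foldl (fun expr i =>
      let expr := if PySem.List.slice w (some i) (some (i + 4)) ∈
            [['e','x','p','('], ['c','o','s','('], ['s','i','n','('], ['t','a','n','(']]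
                  then expr ++ ['f','u','n','.'] else expr
      let c := PySem.List.pyGetD w i ' '
      if c = '^' then expr ++ ['*','*'] else expr ++ [c]) acc
    = acc ++ pvARec s := by
  induction s with
  | nil =>
    intro w u acc hw
    subst hw
    simp [pvARec, PySem.List.pyRange_one_eq_nil]
  | cons c cs ih =>
    intro w u acc hw
    subst hw
    rw [PySem.List.pyRange_one_cons (by simp), List.foldl_cons]
    have e1 : ((u.length : Int)) + 4 = ((u.length + 4 : Nat) : Int) := by push_cast; ring
    have e2 : PySem.List.slice (u ++ c :: cs) (some (u.length : Int)) (some ((u.length : Int) + 4))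
        = (c :: cs).take 4 := by
      rw [e1, PySem.List.slice_natCast]
      simp
    have e3 : PySem.List.pyGetD (u ++ c :: cs) (u.length : Int) ' ' = c := by
      rw [PySem.List.pyGetD_natCast]
      simp [List.getD_eq_getElem?_getD]
    have e4 : ((u.length : Int)) + 1 = (((u ++ [c]).length : Nat) : Int) := by simp
    rw [e4]
    have hw' : u ++ c :: cs = (u ++ [c]) ++ cs := by simp
    rw [show (u ++ c :: cs).length = ((u ++ [c]) ++ cs).length from by simp]
    conv_lhs => rw [hw']
    rw [ih ((u ++ [c]) ++ cs) (u ++ [c]) _ rfl]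
    rw [← hw', e2, e3]
    simp only [pvARec]
    split_ifs <;> simp

-- B's chunks flatten to exactly what A's loop appends
theorem pvScan_eq (s : List Char) : (pvScan s).flatten = pvARec s := by
  induction s using pvScan.induct with
  | case1 rest ih => simp [pvScan, pvARec, ih]
  | case2 rest ih => simp [pvScan, pvARec, ih]
  | case3 rest ih => simp [pvScan, pvARec, ih]
  | case4 rest ih => simp [pvScan, pvARec, ih]
  | case5 c rest h1 h2 h3 h4 ih =>
    have hni : (c :: rest).take 4 ∉ [['e','x','p','('], ['c','o','s','('], ['s','i','n','('], ['t','a','n','(']] := by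
      intro hmem
      have hpre : (c :: rest).take 4 <+: c :: rest := List.take_prefix _ _
      simp only [List.mem_cons, List.not_mem_nil, or_false] at hmem
      rcases hmem with h | h | h | h <;>
        · rw [h] at hpre
          obtain ⟨t, ht⟩ := hpre
          simp only [List.cons_append, List.nil_append, List.cons.injEq] at ht
          first
            | exact h1 t ht.1.symm ht.2.symm
            | exact h2 t ht.1.symm ht.2.symm
            | exact h3 t ht.1.symm ht.2.symm
            | exact h4 t ht.1.symm ht.2.symm
    simp only [pvScan, pvARec, List.flatten_cons, ih, if_neg hni, List.nil_append]
  | case6 => rfl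

-- ''.join with empty separator is concatenation
theorem pvJoin_nil (ps : List (List Char)) : PySem.Chars.join [] ps = ps.flatten := by
  simp only [PySem.Chars.join, List.intercalate]
  induction ps with
  | nil => rfl
  | cons p ps ih =>
    cases ps with
    | nil => simp
    | cons q qs => simp_all [List.intersperse]

-- ===== VERDICT (by name: the statement is the Claim_ definition above) =====
theorem string_convert_spec : Claim_equal_string_convert := by
  intro string _
  show string_convert string = string_convert_alt string
  unfold string_convert string_convert_alt
  rw [pvJoin_nil, pvScan_eq]
  exact congrArg String.ofList
    ((pvLoop string.toList string.toList [] [] rfl).trans (List.nil_append _))
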